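-- pv_equiv track=rewrite | github.com/shubansridhar/csci570project | src/efficient.py | compute_alignment_cost_backward
-- ===== SOURCE A (Python) =====
-- DELTA = 30
--
-- ALPHA = {
--     ('A', 'A'): 0, ('A', 'C'): 110, ('A', 'G'): 48, ('A', 'T'): 94,
--     ('C', 'A'): 110, ('C', 'C'): 0, ('C', 'G'): 118, ('C', 'T'): 48,
--     ('G', 'A'): 48, ('G', 'C'): 118, ('G', 'G'): 0, ('G', 'T'): 110,
--     ('T', 'A'): 94, ('T', 'C'): 48, ('T', 'G'): 110, ('T', 'T'): 0
-- }
--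
-- def compute_alignment_cost_backward(x, y):
--     """
--     Compute alignment costs using space-efficient DP (backward direction)
--     Returns array of costs for first row
--     """
--     m, n = len(x), len(y)
--
--     # initialize for going backwards
--     prev = [(n - j) * DELTA for j in range(n + 1)]
--     curr = [0] * (n + 1)
--
--     for i in range(m - 1, -1, -1):
--         curr[n] = (m - i) * DELTA
--         for j in range(n - 1, -1, -1):
--             match_cost = prev[j+1] + ALPHA[(x[i], y[j])]
--             gap_x = prev[j] + DELTA
--             gap_y = curr[j+1] + DELTA
--             curr[j] = min(match_cost, gap_x, gap_y)
--         prev, curr = curr, prev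
--
--     return prev
-- ===== SOURCE B (Python) =====
-- DELTA = 30
--
-- ALPHA = {
--     ('A', 'A'): 0, ('A', 'C'): 110, ('A', 'G'): 48, ('A', 'T'): 94,
--     ('C', 'A'): 110, ('C', 'C'): 0, ('C', 'G'): 118, ('C', 'T'): 48,
--     ('G', 'A'): 48, ('G', 'C'): 118, ('G', 'G'): 0, ('G', 'T'): 110,
--     ('T', 'A'): 94, ('T', 'C'): 48, ('T', 'G'): 110, ('T', 'T'): 0
-- }
--
-- def compute_alignment_cost_backward(x, y):
--     """Transposed, zip-driven DP: sweep columns j = n-1 .. 0, each column kept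
--     bottom-to-top and rebuilt by zipping the reversed x with the previous
--     column; collect dp[0][j] (the running accumulator) per column and reverse."""
--     m, n = len(x), len(y)
--     rx = x[::-1]
--     rcol = [i * DELTA for i in range(m + 1)]   # column j = n, bottom-to-top
--     tops = [m * DELTA]                         # dp[0][j] for j = n, n-1, ..., 0
--     bottom = 0
--     for yj in reversed(y):
--         bottom += DELTA
--         last = bottom
--         new = [last]
--         for xi, below, diag in zip(rx, rcol[1:], rcol):
--             last = min(diag + ALPHA[(xi, yj)], last + DELTA, below + DELTA)
--             new.append(last)
--         rcol = new
--         tops.append(last)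
--     return tops[::-1]
-- ===== Notes on version B (the rewrite author's own statement) =====
-- stated objective: alternative
-- what changed: Transposed the DP and made it functional: B sweeps columns j=n-1..0 keeping each column bottom-to-top, rebuilds a column by zipping the reversed x with the previous column while threading a running accumulator, collects dp[0][j] per column and reverses at the end, instead of A's two index-mutated rows of length n+1 swept over x.
import Mathlib
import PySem

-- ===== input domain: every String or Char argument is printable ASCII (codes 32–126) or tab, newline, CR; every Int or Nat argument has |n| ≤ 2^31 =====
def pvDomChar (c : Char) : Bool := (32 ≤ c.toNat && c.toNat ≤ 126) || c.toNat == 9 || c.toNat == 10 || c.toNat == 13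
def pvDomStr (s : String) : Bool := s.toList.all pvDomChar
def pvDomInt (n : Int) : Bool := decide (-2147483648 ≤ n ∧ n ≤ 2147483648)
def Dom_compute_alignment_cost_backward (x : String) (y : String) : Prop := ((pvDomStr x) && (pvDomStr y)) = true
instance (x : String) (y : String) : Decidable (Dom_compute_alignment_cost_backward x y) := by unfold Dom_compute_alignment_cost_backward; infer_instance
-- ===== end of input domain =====

-- B transposes the DP and makes it functional (zip-driven bottom-to-top columns with a
-- running accumulator, collecting dp[0][j] per column) instead of A's two mutated rows;
-- same asymptotic cost, proved equal.

-- shared module context: DELTA = 30; ALPHA as a function (keys are exactly the ACGT pairs;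
-- Pre_ excludes the inputs on which Python's dict lookup would raise KeyError, default 0 unused there)
def pvAlpha (a b : Char) : Int :=
  match a, b with
  | 'A', 'A' => 0 | 'A', 'C' => 110 | 'A', 'G' => 48 | 'A', 'T' => 94
  | 'C', 'A' => 110 | 'C', 'C' => 0 | 'C', 'G' => 118 | 'C', 'T' => 48
  | 'G', 'A' => 48 | 'G', 'C' => 118 | 'G', 'G' => 0 | 'G', 'T' => 110
  | 'T', 'A' => 94 | 'T', 'C' => 48 | 'T', 'G' => 110 | 'T', 'T' => 0
  | _, _ => 0

-- ===== PORT A =====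
-- inner loop: for j in range(n-1, -1, -1), counter k runs n, n-1, …; loop variable j = k-1
def pvAInner (xs ys : List Char) (i : Nat) (prev : List Int) : Nat → List Int → List Int
  | 0, curr => curr
  | j+1, curr =>
      let match_cost := prev.getD (j+1) 0 + pvAlpha (xs.getD i ' ') (ys.getD j ' ')
      let gap_x := prev.getD j 0 + 30
      let gap_y := curr.getD (j+1) 0 + 30
      pvAInner xs ys i prev j (curr.set j (min match_cost (min gap_x gap_y)))

-- outer loop: for i in range(m-1, -1, -1); state (prev, curr), swapped each pass
def pvAOuter (xs ys : List Char) (m n : Nat) : Nat → List Int → List Int → List Int × List Int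
  | 0, prev, curr => (prev, curr)
  | i+1, prev, curr =>
      let curr1 := curr.set n (((m : Int) - (i : Int)) * 30)
      let curr2 := pvAInner xs ys i prev n curr1
      pvAOuter xs ys m n i curr2 prev

def compute_alignment_cost_backward (x : String) (y : String) : List Int :=
  let xs := x.toList
  let ys := y.toList
  let m := xs.length
  let n := ys.length
  let prev := (List.range (n+1)).map (fun j : Nat => ((n : Int) - (j : Int)) * 30)
  let curr := List.replicate (n+1) (0 : Int)
  (pvAOuter xs ys m n m prev curr).1

-- ===== PORT B =====
-- for xi, below, diag in zip(rx, rcol[1:], rcol): thread (last, new) through the zipped triples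
def pvBFold (yj : Char) : List (Char × Int × Int) → Int × List Int → Int × List Int
  | [], st => st
  | (xi, below, diag) :: rest, (last, new) =>
      let last' := min (diag + pvAlpha xi yj) (min (last + 30) (below + 30))
      pvBFold yj rest (last', new.concat last')

-- for yj in reversed(y): state (bottom, rcol, tops)
def pvBCols (rx : List Char) : List Char → Int → List Int → List Int → List Int
  | [], _bottom, _rcol, tops => tops
  | yj :: rest, bottom, rcol, tops =>
      let b := bottom + 30
      let (last, new) := pvBFold yj (rx.zip ((rcol.drop 1).zip rcol)) (b, [b])
      pvBCols rx rest b new (tops.concat last)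

def compute_alignment_cost_backward_alt (x : String) (y : String) : List Int :=
  let xs := x.toList
  let ys := y.toList
  let m := xs.length
  let rx := xs.reverse
  let rcol := (List.range (m+1)).map (fun i : Nat => (i : Int) * 30)
  let tops := pvBCols rx ys.reverse 0 rcol [(m : Int) * 30]
  tops.reverse

-- ===== PRECONDITION & SPEC =====
-- Pre_ excludes exactly the inputs on which Python A raises KeyError: both strings nonempty
-- and some character outside 'ACGT' (with either string empty the ALPHA lookup is never reached).
def Pre_compute_alignment_cost_backward (x : String) (y : String) : Prop :=
  x = "" ∨ y = "" ∨
    (x.toList.all (fun c => c ∈ (['A','C','G','T'] : List Char)) = true ∧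
     y.toList.all (fun c => c ∈ (['A','C','G','T'] : List Char)) = true)
instance (x : String) (y : String) : Decidable (Pre_compute_alignment_cost_backward x y) := by
  unfold Pre_compute_alignment_cost_backward; infer_instance

def pvWitness_compute_alignment_cost_backward : String × String := ("AC", "GT")

def Spec_compute_alignment_cost_backward (x : String) (y : String) (out : List Int) : Prop := out = compute_alignment_cost_backward_alt x y
instance (x : String) (y : String) (out : List Int) : Decidable (Spec_compute_alignment_cost_backward x y out) := by unfold Spec_compute_alignment_cost_backward; infer_instance

-- ===== CLAIM (what is proved, stated in full; the proofs are below) =====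
def Claim_equal_compute_alignment_cost_backward : Prop := ∀ (x : String) (y : String), Dom_compute_alignment_cost_backward x y → Pre_compute_alignment_cost_backward x y → Spec_compute_alignment_cost_backward x y (compute_alignment_cost_backward x y)

-- ===== LEMMAS AND PROOFS =====

-- the mathematical DP table both programs fill: dp i j = cost of aligning x[i:] with y[j:]
def pvCost (xs ys : List Char) (i j : Nat) : Int :=
  if _hi : xs.length ≤ i then ((ys.length : Int) - (j : Int)) * 30
  else if _hj : ys.length ≤ j then ((xs.length : Int) - (i : Int)) * 30
  else min (pvCost xs ys (i+1) (j+1) + pvAlpha (xs.getD i ' ') (ys.getD j ' '))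
           (min (pvCost xs ys (i+1) j + 30) (pvCost xs ys i (j+1) + 30))
termination_by (xs.length - i) + (ys.length - j)
decreasing_by all_goals omega

theorem pvGetD_set_self (l : List Int) (i : Nat) (v : Int) (h : i < l.length) :
    (l.set i v).getD i 0 = v := by
  simp [List.getD, h]

theorem pvGetD_set_ne (l : List Int) (i t : Nat) (v : Int) (h : i ≠ t) :
    (l.set i v).getD t 0 = l.getD t 0 := by
  simp [List.getD, List.getElem?_set_ne h]

theorem pvAInner_spec (xs ys : List Char) (i : Nat) (him : i < xs.length) :
    ∀ (k : Nat) (prev curr : List Int), k ≤ ys.length →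
    curr.length = ys.length + 1 →
    (∀ t, t ≤ ys.length → prev.getD t 0 = pvCost xs ys (i+1) t) →
    curr.getD k 0 = pvCost xs ys i k →
    (pvAInner xs ys i prev k curr).length = ys.length + 1 ∧
    (∀ t, t ≤ k → (pvAInner xs ys i prev k curr).getD t 0 = pvCost xs ys i t) ∧
    (∀ t, k < t → (pvAInner xs ys i prev k curr).getD t 0 = curr.getD t 0) := by
  intro k
  induction k with
  | zero =>
    intro prev curr _ hlen _ hck
    refine ⟨by simpa [pvAInner] using hlen, ?_, ?_⟩
    · intro t ht; interval_cases t; simpa [pvAInner] using hck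
    · intro t _; simp [pvAInner]
  | succ j ih =>
    intro prev curr hk hlen hprev hck
    have hjn : j < ys.length := by omega
    have hv : min (prev.getD (j+1) 0 + pvAlpha (xs.getD i ' ') (ys.getD j ' '))
        (min (prev.getD j 0 + 30) (curr.getD (j+1) 0 + 30)) = pvCost xs ys i j := by
      rw [hprev (j+1) (by omega), hprev j (by omega), hck]
      conv_rhs => rw [pvCost]
      rw [dif_neg (by omega), dif_neg (by omega)]
    set v := min (prev.getD (j+1) 0 + pvAlpha (xs.getD i ' ') (ys.getD j ' '))
        (min (prev.getD j 0 + 30) (curr.getD (j+1) 0 + 30)) with hvdef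
    have hstep : pvAInner xs ys i prev (j+1) curr = pvAInner xs ys i prev j (curr.set j v) := by
      simp [pvAInner, hvdef]
    have hjlt : j < curr.length := by omega
    obtain ⟨h1, h2, h3⟩ := ih prev (curr.set j v) (by omega) (by simpa using hlen)
      hprev (by rw [pvGetD_set_self _ _ _ hjlt, hv])
    refine ⟨by rw [hstep]; exact h1, ?_, ?_⟩
    · intro t ht
      rw [hstep]
      rcases Nat.lt_or_ge t (j+1) with h | h
      · exact h2 t (by omega)
      · have ht' : t = j + 1 := by omega
        subst ht'
        rw [h3 (j+1) (by omega), pvGetD_set_ne _ _ _ _ (by omega), hck]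
    · intro t ht
      rw [hstep, h3 t (by omega), pvGetD_set_ne _ _ _ _ (by omega)]

theorem pvAOuter_spec (xs ys : List Char) (m n : Nat) (hm : m = xs.length) (hn : n = ys.length) :
    ∀ (k : Nat) (prev curr : List Int), k ≤ m →
    prev.length = n + 1 → curr.length = n + 1 →
    (∀ t, t ≤ n → prev.getD t 0 = pvCost xs ys k t) →
    ((pvAOuter xs ys m n k prev curr).1.length = n + 1 ∧
      ∀ t, t ≤ n → (pvAOuter xs ys m n k prev curr).1.getD t 0 = pvCost xs ys 0 t) := by
  subst hm; subst hn
  intro k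
  induction k with
  | zero =>
    intro prev curr _ hpl _ hprev
    exact ⟨by simpa [pvAOuter] using hpl, by intro t ht; simpa [pvAOuter] using hprev t ht⟩
  | succ i ih =>
    intro prev curr hk hpl hcl hprev
    have him : i < xs.length := by omega
    have hcn : ((curr.set ys.length (((xs.length : Int) - (i : Int)) * 30))).getD ys.length 0
        = pvCost xs ys i ys.length := by
      rw [pvGetD_set_self _ _ _ (by omega)]
      rw [pvCost, dif_neg (by omega), dif_pos le_rfl]
    obtain ⟨h1, h2, _⟩ := pvAInner_spec xs ys i him ys.length prev
      (curr.set ys.length (((xs.length : Int) - (i : Int)) * 30)) le_rfl (by simpa using hcl)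
      hprev hcn
    have hstep : pvAOuter xs ys xs.length ys.length (i+1) prev curr
        = pvAOuter xs ys xs.length ys.length i
            (pvAInner xs ys i prev ys.length (curr.set ys.length (((xs.length : Int) - (i : Int)) * 30))) prev := by
      simp [pvAOuter]
    rw [hstep]
    exact ih _ prev (by omega) h1 hpl h2

-- B side: the zipped triple list peels off one (x-char, below, diag) per step
theorem pvZip_cons (c : Char) (cs : List Char) (a b : Int) (rest : List Int) :
    (c :: cs).zip ((((a :: b :: rest) : List Int).drop 1).zip (a :: b :: rest))
      = (c, b, a) :: cs.zip (((b :: rest).drop 1).zip (b :: rest)) := by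
  simp [List.zip]

theorem pvGetD_reverse_map_range (n : Nat) (f : Nat -> Int) (k : Nat) (hk : k <= n) :
    (((List.range (n+1)).map f).reverse).getD k 0 = f (n - k) := by
  rw [List.getD_eq_getElem _ _ (by simp; omega)]
  rw [List.getElem_reverse]
  simp only [List.getElem_map, List.getElem_range, List.length_map, List.length_range]
  congr 1

-- inner fold invariant: processing (x.take q).reverse against the bottom q+1 entries of the
-- old column yields dp[0][j] as accumulator and the new bottom-to-top column as the list
theorem pvBFold_spec (xs ys : List Char) (j : Nat) (hj : j < ys.length) :
    forall (q : Nat) (rcol acc : List Int), q <= xs.length ->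
    rcol.length = q + 1 ->
    (forall u, u <= q -> rcol.getD u 0 = pvCost xs ys (q - u) (j+1)) ->
    pvBFold (ys.getD j ' ') ((xs.take q).reverse.zip ((rcol.drop 1).zip rcol))
        (pvCost xs ys q j, acc)
      = (pvCost xs ys 0 j,
         acc ++ ((List.range q).map (fun u => pvCost xs ys u j)).reverse) := by
  intro q
  induction q with
  | zero =>
    intro rcol acc _ _ _
    simp [pvBFold]
  | succ q ih =>
    intro rcol acc hq hlen hval
    have hq' : q < xs.length := by omega
    obtain (_|⟨a, rcol'⟩) := rcol
    · simp at hlen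
    obtain (_|⟨b, rest⟩) := rcol'
    · simp at hlen
    have htake : (xs.take (q+1)).reverse = xs.getD q ' ' :: (xs.take q).reverse := by
      rw [List.take_add_one, List.getElem?_eq_getElem hq', List.getD_eq_getElem _ _ hq']
      simp
    have hvala : a = pvCost xs ys (q+1) (j+1) := by
      have := hval 0 (by omega); simpa [List.getD] using this
    have hvalb : b = pvCost xs ys q (j+1) := by
      have := hval 1 (by omega); simpa [List.getD] using this
    have hstep' : min (a + pvAlpha (xs.getD q ' ') (ys.getD j ' '))
        (min (pvCost xs ys (q+1) j + 30) (b + 30)) = pvCost xs ys q j := by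
      rw [hvala, hvalb]
      conv_rhs => rw [pvCost]
      rw [dif_neg (by omega), dif_neg (by omega)]
    rw [htake, pvZip_cons]
    simp only [pvBFold]
    rw [hstep']
    have hrest : forall u, u <= q -> (b :: rest).getD u 0 = pvCost xs ys (q - u) (j+1) := by
      intro u hu
      have := hval (u+1) (by omega)
      simpa [List.getD, Nat.succ_sub_succ] using this
    rw [ih (b :: rest) (acc.concat (pvCost xs ys q j)) (by omega) (by simpa using hlen) hrest]
    have hr : (List.range (q+1)).map (fun u => pvCost xs ys u j)
        = (List.range q).map (fun u => pvCost xs ys u j) ++ [pvCost xs ys q j] := by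
      rw [List.range_succ]; simp
    rw [hr, List.reverse_append]
    simp [List.concat_eq_append]

-- outer recursion invariant over the remaining reversed-y suffix
theorem pvBCols_spec (xs ys : List Char) :
    forall (j : Nat) (rcol tops : List Int), j <= ys.length ->
    rcol.length = xs.length + 1 ->
    (forall k, k <= xs.length -> rcol.getD k 0 = pvCost xs ys (xs.length - k) j) ->
    pvBCols xs.reverse ((ys.take j).reverse) (((ys.length : Int) - (j : Int)) * 30) rcol tops
      = tops ++ ((List.range j).map (fun u => pvCost xs ys 0 u)).reverse := by
  intro j
  induction j with
  | zero =>
    intro rcol tops _ _ _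
    simp [pvBCols]
  | succ j ih =>
    intro rcol tops hj hlen hval
    have hjn : j < ys.length := by omega
    have htake : (ys.take (j+1)).reverse = ys.getD j ' ' :: (ys.take j).reverse := by
      rw [List.take_add_one, List.getElem?_eq_getElem hjn, List.getD_eq_getElem _ _ hjn]
      simp
    rw [htake]
    simp only [pvBCols]
    have hb : ((ys.length : Int) - ((j+1 : Nat) : Int)) * 30 + 30
        = ((ys.length : Int) - (j : Int)) * 30 := by push_cast; ring
    rw [hb]
    have hbot : ((ys.length : Int) - (j : Int)) * 30 = pvCost xs ys xs.length j := by
      rw [pvCost, dif_pos le_rfl]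
    have hfold := pvBFold_spec xs ys j hjn xs.length rcol
      [((ys.length : Int) - (j : Int)) * 30] le_rfl hlen hval
    rw [← hbot, List.take_length] at hfold
    rw [hfold]
    have hNEW : ([((ys.length : Int) - (j : Int)) * 30]
          ++ ((List.range xs.length).map (fun u => pvCost xs ys u j)).reverse)
        = ((List.range (xs.length+1)).map (fun u => pvCost xs ys u j)).reverse := by
      rw [hbot, List.range_succ]; simp
    rw [hNEW]
    have hvalnew : forall k, k <= xs.length ->
        (((List.range (xs.length+1)).map (fun u => pvCost xs ys u j)).reverse).getD k 0
          = pvCost xs ys (xs.length - k) j := by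
      intro k hk
      exact pvGetD_reverse_map_range xs.length _ k hk
    rw [ih _ (tops.concat (pvCost xs ys 0 j)) (by omega) (by simp) hvalnew]
    have hr : (List.range (j+1)).map (fun u => pvCost xs ys 0 u)
        = (List.range j).map (fun u => pvCost xs ys 0 u) ++ [pvCost xs ys 0 j] := by
      rw [List.range_succ]; simp
    rw [hr, List.reverse_append]
    simp [List.concat_eq_append]

theorem pvGetD_map_range (n : Nat) (f : Nat → Int) (t : Nat) (ht : t ≤ n) :
    ((List.range (n+1)).map f).getD t 0 = f t := by
  rw [List.getD_eq_getElem _ _ (by simpa using by omega : t < ((List.range (n+1)).map f).length)]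
  simp

theorem pvList_eq_of_getD (L1 L2 : List Int) (n : Nat)
    (h1 : L1.length = n + 1) (h2 : L2.length = n + 1)
    (h : ∀ t, t ≤ n → L1.getD t 0 = L2.getD t 0) : L1 = L2 := by
  apply List.ext_getElem (by omega)
  intro i hi1 hi2
  have := h i (by omega)
  rwa [List.getD_eq_getElem _ _ hi1, List.getD_eq_getElem _ _ hi2] at this

-- ===== VERDICT (by name: the statement is the Claim_ definition above) =====
theorem compute_alignment_cost_backward_spec : Claim_equal_compute_alignment_cost_backward := by
  intro x y _ _
  unfold Spec_compute_alignment_cost_backward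
  unfold compute_alignment_cost_backward compute_alignment_cost_backward_alt
  set xs := x.toList with hxs
  set ys := y.toList with hys
  -- A's side computes the row getD-wise
  obtain ⟨ha1, ha2⟩ := pvAOuter_spec xs ys xs.length ys.length rfl rfl xs.length
    ((List.range (ys.length+1)).map (fun j : Nat => ((ys.length : Int) - (j : Int)) * 30))
    (List.replicate (ys.length+1) (0 : Int)) le_rfl (by simp) (by simp)
    (by
      intro t ht
      rw [pvGetD_map_range ys.length _ t ht, pvCost, dif_pos le_rfl])
  -- B's side: the initial reversed column is the j = n column of the DP
  have hval0 : forall k, k <= xs.length ->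
      (((List.range (xs.length+1)).map (fun i : Nat => (i : Int) * 30))).getD k 0
        = pvCost xs ys (xs.length - k) ys.length := by
    intro k hk
    rw [pvGetD_map_range xs.length _ k hk]
    by_cases hk0 : k = 0
    · subst hk0
      simp only [Nat.sub_zero]
      rw [pvCost, dif_pos le_rfl]
      push_cast; ring
    · rw [pvCost, dif_neg (by omega), dif_pos le_rfl, Nat.cast_sub hk]
      ring
  have hb := pvBCols_spec xs ys ys.length
    ((List.range (xs.length+1)).map (fun i : Nat => (i : Int) * 30))
    [(xs.length : Int) * 30] le_rfl (by simp) hval0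
  rw [List.take_length] at hb
  have h0 : ((ys.length : Int) - (ys.length : Int)) * 30 = 0 := by ring
  rw [h0] at hb
  show (pvAOuter xs ys xs.length ys.length xs.length
      ((List.range (ys.length+1)).map (fun j : Nat => ((ys.length : Int) - (j : Int)) * 30))
      (List.replicate (ys.length+1) (0 : Int))).1
    = (pvBCols xs.reverse ys.reverse 0
        ((List.range (xs.length+1)).map (fun i : Nat => (i : Int) * 30))
        [(xs.length : Int) * 30]).reverse
  rw [hb]
  have htops0 : ((xs.length : Int) * 30) = pvCost xs ys 0 ys.length := by
    rcases Nat.eq_zero_or_pos xs.length with hz | hz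
    · rw [pvCost, dif_pos (by omega)]; simp [hz]
    · rw [pvCost, dif_neg (by omega), dif_pos le_rfl]; push_cast; ring
  have hBlist : ([(xs.length : Int) * 30]
        ++ ((List.range ys.length).map (fun u => pvCost xs ys 0 u)).reverse).reverse
      = (List.range (ys.length+1)).map (fun u => pvCost xs ys 0 u) := by
    rw [htops0, List.range_succ]
    simp
  rw [hBlist]
  exact pvList_eq_of_getD _ _ ys.length ha1 (by simp)
    (by intro t ht; rw [ha2 t ht, pvGetD_map_range ys.length _ t ht])
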